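-- pv_equiv track=rewrite | github.com/SeanM743/coding-problems | rec_football_score.py | football_scoring
-- ===== SOURCE A (Python) =====
-- def football_scoring(points, ways_to_score = {2,3,7}):
--
--     def scoring(p, score):
--         if p == 0:
--             results.append(score[:])
--
--         elif p > 0:
--             for s in ways_to_score:
--                 score.append(s)
--                 scoring(p-s, score)
--                 score.pop()
--
--     results = []
--     scoring(12, [])
--     return results
-- ===== SOURCE B (Python) =====
-- def football_scoring(points, ways_to_score={2, 3, 7}):
--     # Bottom-up DP: table[n] lists, in A's preorder, every sequence of scores summing to n.
--     ways = list(ways_to_score)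
--     table = [[[]]]
--     for n in range(1, 13):
--         seqs = []
--         for s in ways:
--             if n - s >= 0:
--                 for rest in table[n - s]:
--                     seqs.append([s] + rest)
--         table.append(seqs)
--     return table[12]
-- ===== Notes on version B (the rewrite author's own statement) =====
-- stated objective: alternative
-- what changed: Replaces the recursive backtracking DFS (mutating a shared score list) with a bottom-up dynamic-programming table: table[n] holds, in the same preorder, all score sequences summing to n, built iteratively for n = 1..12 from earlier entries; the answer is table[12].
import Mathlib
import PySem

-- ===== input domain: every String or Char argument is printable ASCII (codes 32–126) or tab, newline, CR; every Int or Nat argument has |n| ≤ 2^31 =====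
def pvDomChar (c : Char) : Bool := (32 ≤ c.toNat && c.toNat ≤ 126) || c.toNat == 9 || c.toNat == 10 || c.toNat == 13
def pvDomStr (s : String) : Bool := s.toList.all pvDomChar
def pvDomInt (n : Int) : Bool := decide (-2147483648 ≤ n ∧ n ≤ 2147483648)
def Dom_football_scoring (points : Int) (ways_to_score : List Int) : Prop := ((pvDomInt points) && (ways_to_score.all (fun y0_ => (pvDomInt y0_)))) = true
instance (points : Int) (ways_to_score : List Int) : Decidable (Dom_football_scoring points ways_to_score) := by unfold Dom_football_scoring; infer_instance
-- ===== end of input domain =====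

-- B replaces A's recursive DFS with an iterative bottom-up DP table (same return value); A mutates no argument.

-- ===== PORT A =====
-- A's inner `scoring`, with the mutated `score`/`results` threaded functionally.
-- `fuel` is a totality guard only: under Pre_ every score is ≥ 1, so depth from p = 12 is < 13
-- and the fuel-0 branch is never reached.
def scoringA (ways : List Int) : Nat → Int → List Int → List (List Int) → List (List Int)
  | fuel, p, score, results =>
    if p = 0 then results ++ [score]
    else if 0 < p then
      match fuel with
      | 0 => results
      | f + 1 => ways.foldl (fun res s => scoringA ways f (p - s) (score ++ [s]) res) results
    else results

def football_scoring (points : Int) (ways_to_score : List Int) : List (List Int) :=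
  scoringA ways_to_score 13 12 [] []

-- ===== PORT B =====
-- pyGetD ports Python's table[n - s] / table[12]; under Pre_ every index used is in range, so it is exact.
def football_scoring_alt (points : Int) (ways_to_score : List Int) : List (List Int) :=
  let table := (PySem.List.pyRange 1 13 1).foldl
    (fun tbl n => tbl ++ [ways_to_score.foldl
      (fun seqs s =>
        if 0 ≤ n - s then
          seqs ++ ((PySem.List.pyGetD tbl (n - s) []).map (fun rest => s :: rest))
        else seqs) []])
    [[[]]]
  PySem.List.pyGetD table 12 []

-- ===== PRECONDITION & SPEC =====
-- A recurses forever (Python RecursionError) whenever ways_to_score contains an element ≤ 0;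
-- Pre_ excludes exactly those inputs (B's Python raises IndexError there).
def Pre_football_scoring (points : Int) (ways_to_score : List Int) : Prop :=
  ∀ s ∈ ways_to_score, 1 ≤ s
instance (points : Int) (ways_to_score : List Int) : Decidable (Pre_football_scoring points ways_to_score) := by
  unfold Pre_football_scoring; infer_instance
def pvWitness_football_scoring : Int × List Int := (12, [2, 3, 7])

def Spec_football_scoring (points : Int) (ways_to_score : List Int) (out : List (List Int)) : Prop := out = football_scoring_alt points ways_to_score
instance (points : Int) (ways_to_score : List Int) (out : List (List Int)) : Decidable (Spec_football_scoring points ways_to_score out) := by unfold Spec_football_scoring; infer_instance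

-- ===== CLAIM (what is proved, stated in full; the proofs are below) =====
def Claim_equal_football_scoring : Prop := ∀ (points : Int) (ways_to_score : List Int), Dom_football_scoring points ways_to_score → Pre_football_scoring points ways_to_score → Spec_football_scoring points ways_to_score (football_scoring points ways_to_score)

-- ===== LEMMAS AND PROOFS =====

-- one iteration of B's outer loop (same term as the lambda in the port)
def bstep (ways : List Int) (tbl : List (List (List Int))) (n : Int) : List (List (List Int)) :=
  tbl ++ [ways.foldl
    (fun seqs s =>
      if 0 ≤ n - s then
        seqs ++ ((PySem.List.pyGetD tbl (n - s) []).map (fun rest => s :: rest))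
      else seqs) []]

-- B's table after the iterations n = 1 .. m
def buildT (ways : List Int) (m : Nat) : List (List (List Int)) :=
  (PySem.List.pyRange 1 (1 + (m : Int)) 1).foldl (bstep ways) [[[]]]

theorem buildT_zero (ways : List Int) : buildT ways 0 = [[[]]] := by
  simp [buildT, PySem.List.pyRange_one_eq_nil]

theorem buildT_succ (ways : List Int) (m : Nat) :
    buildT ways (m + 1) = bstep ways (buildT ways m) (1 + (m : Int)) := by
  unfold buildT
  rw [show (1 + ((m + 1 : Nat) : Int)) = (1 + (m : Int)) + 1 by push_cast; ring,
      PySem.List.pyRange_one_succ_right (by omega)]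
  simp

theorem buildT_length (ways : List Int) (m : Nat) : (buildT ways m).length = m + 1 := by
  induction m with
  | zero => simp [buildT_zero]
  | succ m ih => rw [buildT_succ]; simp [bstep, ih]

theorem getD_append_lt {α : Type} (l l' : List α) (i : Nat) (d : α) (h : i < l.length) :
    (l ++ l').getD i d = l.getD i d := by
  simp [List.getD, List.getElem?_append_left h]

theorem getD_append_self {α : Type} (l : List α) (e d : α) :
    (l ++ [e]).getD l.length d = e := by
  simp [List.getD]

-- the inner loops agree: A's foldl over ways equals B's foldl over ways, given the table
-- already characterises every strictly smaller sub-total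
theorem foldl_aux (ways : List Int) (f : Nat) (tbl : List (List (List Int))) (n : Int)
    (score : List Int) (hlen : (tbl.length : Int) = n)
    (hinv : ∀ i : Nat, (i : Int) < n → ∀ sc res,
      scoringA ways f (i : Int) sc res = res ++ (tbl.getD i []).map (fun t => sc ++ t)) :
    ∀ (l : List Int), (∀ s ∈ l, 1 ≤ s) → ∀ (results : List (List Int)) (seqs : List (List Int)),
      l.foldl (fun res s => scoringA ways f (n - s) (score ++ [s]) res)
          (results ++ seqs.map (fun t => score ++ t))
        = results ++ (l.foldl
            (fun seqs s =>
              if 0 ≤ n - s then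
                seqs ++ ((PySem.List.pyGetD tbl (n - s) []).map (fun rest => s :: rest))
              else seqs) seqs).map (fun t => score ++ t) := by
  intro l
  induction l with
  | nil => intro _ results seqs; simp
  | cons s l ihl =>
    intro hl results seqs
    have hs : 1 ≤ s := hl s (List.mem_cons_self)
    simp only [List.foldl_cons]
    by_cases hns : 0 ≤ n - s
    · have hcast : ((n - s).toNat : Int) = n - s := Int.toNat_of_nonneg hns
      have hlt : ((n - s).toNat : Int) < n := by omega
      have hidx : (n - s).toNat < tbl.length := by omega
      have hstep := hinv (n - s).toNat hlt (score ++ [s]) (results ++ seqs.map (fun t => score ++ t))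
      rw [hcast] at hstep
      rw [hstep]
      have hget : PySem.List.pyGetD tbl (n - s) [] = tbl.getD (n - s).toNat [] := by
        rw [PySem.List.pyGetD_eq_getElem tbl [] hns (by omega)]
        rw [List.getD_eq_getElem tbl [] hidx]
      rw [if_pos hns, hget]
      have hmap : (seqs ++ (tbl.getD (n - s).toNat []).map (fun rest => s :: rest)).map
            (fun t => score ++ t)
          = seqs.map (fun t => score ++ t)
            ++ (tbl.getD (n - s).toNat []).map (fun t => (score ++ [s]) ++ t) := by
        simp [List.map_map, Function.comp]
      rw [List.append_assoc, ← hmap]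
      exact ihl (fun x hx => hl x (List.mem_cons_of_mem _ hx)) results _
    · have h1 : ¬ (n - s = 0) := by omega
      have h2 : ¬ (0 < n - s) := by omega
      rw [show scoringA ways f (n - s) (score ++ [s])
            (results ++ seqs.map (fun t => score ++ t))
          = results ++ seqs.map (fun t => score ++ t) by
        have hA : ¬ n = s := by omega
        have hB : ¬ s < n := by omega
        rw [scoringA.eq_def]
        simp [hA, hB]
        omega]
      rw [if_neg hns]
      exact ihl (fun x hx => hl x (List.mem_cons_of_mem _ hx)) results seqs

-- main invariant: the DP table entry i equals what A's recursion produces for remaining = i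
theorem buildT_inv (ways : List Int) (hw : ∀ s ∈ ways, 1 ≤ s) :
    ∀ (m : Nat) (i : Nat), i ≤ m → ∀ (fuel : Nat), i < fuel → ∀ score results,
      scoringA ways fuel (i : Int) score results
        = results ++ ((buildT ways m).getD i []).map (fun t => score ++ t) := by
  intro m
  induction m with
  | zero =>
    intro i hi fuel hf score results
    interval_cases i
    rw [scoringA.eq_def]
    simp [buildT_zero]
  | succ m ih =>
    intro i hi fuel hf score results
    rcases Nat.lt_or_ge i (m + 1) with h | h
    · rw [buildT_succ, bstep,
          getD_append_lt _ _ _ _ (by rw [buildT_length]; omega)]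
      exact ih i (by omega) fuel hf score results
    · have hi' : i = m + 1 := by omega
      subst hi'
      cases fuel with
      | zero => omega
      | succ f =>
        rw [scoringA.eq_def]
        have h0 : ¬ ((m + 1 : Nat) : Int) = 0 := by push_cast; omega
        have h1 : (0 : Int) < ((m + 1 : Nat) : Int) := by push_cast; omega
        simp only [h0, h1, if_true, if_false]
        rw [buildT_succ, bstep]
        have hlen := buildT_length ways m
        rw [show (buildT ways m ++ [(ways.foldl
              (fun seqs s =>
                if 0 ≤ (1 + (m : Int)) - s then
                  seqs ++ ((PySem.List.pyGetD (buildT ways m) ((1 + (m : Int)) - s) []).map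
                    (fun rest => s :: rest))
                else seqs) [])]).getD (m + 1) []
            = ways.foldl
              (fun seqs s =>
                if 0 ≤ (1 + (m : Int)) - s then
                  seqs ++ ((PySem.List.pyGetD (buildT ways m) ((1 + (m : Int)) - s) []).map
                    (fun rest => s :: rest))
                else seqs) [] by
          rw [← hlen, getD_append_self]]
        have hcast : ((m + 1 : Nat) : Int) = 1 + (m : Int) := by push_cast; ring
        rw [hcast]
        have := foldl_aux ways f (buildT ways m) (1 + (m : Int)) score
          (by rw [hlen]; push_cast; ring)
          (fun j hj sc res => ih j (by omega) f (by omega) sc res)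
          ways hw results []
        simpa using this

-- ===== VERDICT (by name: the statement is the Claim_ definition above) =====
theorem football_scoring_spec : Claim_equal_football_scoring := by
  intro points ways _ hpre
  show football_scoring points ways = football_scoring_alt points ways
  have hb : football_scoring_alt points ways
      = PySem.List.pyGetD (buildT ways 12) 12 [] := by
    unfold football_scoring_alt buildT bstep
    norm_num
  have hlen := buildT_length ways 12
  have hget : PySem.List.pyGetD (buildT ways 12) 12 []
      = (buildT ways 12).getD 12 [] := by
    rw [PySem.List.pyGetD_eq_getElem (buildT ways 12) [] (by omega) (by rw [hlen]; norm_num)]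
    rw [List.getD_eq_getElem _ [] (by rw [hlen]; norm_num)]
    rfl
  have ha := buildT_inv ways hpre 12 12 (le_refl _) 13 (by omega) [] []
  have hcast : ((12 : Nat) : Int) = (12 : Int) := by norm_num
  rw [hcast] at ha
  unfold football_scoring
  rw [ha, hb, hget]
  simp
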